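-- pv_equiv track=rewrite | github.com/bergerjacob/RelCube | utils/cube_facelet.py | cycle_edges
-- ===== SOURCE A (Python) =====
-- EDGE_CYCLES = {
--     'U': [45, 46, 47, 9, 10, 11, 18, 19, 20, 36, 37, 38],
--     'D': [24, 25, 26, 15, 16, 17, 51, 52, 53, 42, 43, 44],
--     'L': [0, 3, 6, 18, 21, 24, 27, 30, 33, 53, 50, 47],
--     'R': [8, 5, 2, 45, 48, 51, 35, 32, 29, 26, 23, 20],
--     'F': [6, 7, 8, 9, 12, 15, 29, 28, 27, 44, 41, 38],
--     'B': [2, 1, 0, 36, 39, 42, 33, 34, 35, 17, 14, 11],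
-- }
--
-- def cycle_edges(state: str, face: str, times: int = 1) -> str:
--     cycle = EDGE_CYCLES[face]
--     state_list = list(state)
--     for _ in range(times % 4):
--         temp = [state_list[cycle[i]] for i in range(3)]
--         # Shift 4 groups of 3
--         for i in range(3):
--             state_list[cycle[i]] = state_list[cycle[9+i]]
--             state_list[cycle[9+i]] = state_list[cycle[6+i]]
--             state_list[cycle[6+i]] = state_list[cycle[3+i]]
--             state_list[cycle[3+i]] = temp[i]
--     return ''.join(state_list)
-- ===== SOURCE B (Python) =====
-- EDGE_CYCLES = {
--     'U': [45, 46, 47, 9, 10, 11, 18, 19, 20, 36, 37, 38],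
--     'D': [24, 25, 26, 15, 16, 17, 51, 52, 53, 42, 43, 44],
--     'L': [0, 3, 6, 18, 21, 24, 27, 30, 33, 53, 50, 47],
--     'R': [8, 5, 2, 45, 48, 51, 35, 32, 29, 26, 23, 20],
--     'F': [6, 7, 8, 9, 12, 15, 29, 28, 27, 44, 41, 38],
--     'B': [2, 1, 0, 36, 39, 42, 33, 34, 35, 17, 14, 11],
-- }
--
-- def cycle_edges(state: str, face: str, times: int = 1) -> str:
--     cycle = EDGE_CYCLES[face]
--     r = times % 4
--     if r == 0:
--         return state
--     orig = list(state)
--     result = list(state)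
--     for g in range(4):
--         src = 3 * ((g - r) % 4)
--         for i in range(3):
--             result[cycle[3 * g + i]] = orig[cycle[src + i]]
--     return ''.join(result)
-- ===== Notes on version B (the rewrite author's own statement) =====
-- stated objective: simpler
-- what changed: B computes r = times % 4 once and applies the single net permutation (group g reads group (g-r) mod 4) in one pass over a copy of the original, instead of A's r in-place rounds each using a temp buffer and chained overwrites.
import Mathlib
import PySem

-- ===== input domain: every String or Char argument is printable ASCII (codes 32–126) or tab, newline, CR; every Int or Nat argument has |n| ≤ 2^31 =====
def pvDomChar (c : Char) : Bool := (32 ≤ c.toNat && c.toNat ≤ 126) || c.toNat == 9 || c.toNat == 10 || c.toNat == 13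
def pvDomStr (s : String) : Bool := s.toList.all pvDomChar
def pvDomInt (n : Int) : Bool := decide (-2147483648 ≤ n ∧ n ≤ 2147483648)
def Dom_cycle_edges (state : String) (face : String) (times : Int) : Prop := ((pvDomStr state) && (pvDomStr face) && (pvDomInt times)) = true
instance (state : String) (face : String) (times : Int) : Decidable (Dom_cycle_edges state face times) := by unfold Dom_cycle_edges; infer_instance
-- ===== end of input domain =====

-- B replaces A's `times % 4` in-place quarter-turn rounds (temp buffer + chained overwrites)
-- by one pass applying the net permutation: group g reads group (g - r) mod 4 from the unmodified original.

-- ===== PORT A =====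
-- the module constant EDGE_CYCLES (dict face -> 12 facelet indices), as an association list
def pvEdgeCycles : List (String × List Nat) :=
  [("U", [45, 46, 47, 9, 10, 11, 18, 19, 20, 36, 37, 38]),
   ("D", [24, 25, 26, 15, 16, 17, 51, 52, 53, 42, 43, 44]),
   ("L", [0, 3, 6, 18, 21, 24, 27, 30, 33, 53, 50, 47]),
   ("R", [8, 5, 2, 45, 48, 51, 35, 32, 29, 26, 23, 20]),
   ("F", [6, 7, 8, 9, 12, 15, 29, 28, 27, 44, 41, 38]),
   ("B", [2, 1, 0, 36, 39, 42, 33, 34, 35, 17, 14, 11])]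

-- one body of A's `for _ in range(times % 4)` loop; list reads/writes are in range under Pre_
def pvStepA (c : List Nat) (l : List Char) : List Char :=
  let temp := (List.range 3).map (fun i => l.getD (c.getD i 0) ' ')
  (List.range 3).foldl (fun s i =>
    let s1 := s.set (c.getD i 0) (s.getD (c.getD (9 + i) 0) ' ')
    let s2 := s1.set (c.getD (9 + i) 0) (s1.getD (c.getD (6 + i) 0) ' ')
    let s3 := s2.set (c.getD (6 + i) 0) (s2.getD (c.getD (3 + i) 0) ' ')
    s3.set (c.getD (3 + i) 0) (temp.getD i ' ')) l

def cycle_edges (state : String) (face : String) (times : Int) : String :=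
  let cycle := (List.lookup face pvEdgeCycles).getD []
  String.ofList ((List.range (PySem.Int.mod times 4).toNat).foldl
    (fun l _ => pvStepA cycle l) state.toList)

-- ===== PORT B =====
def cycle_edges_alt (state : String) (face : String) (times : Int) : String :=
  let cycle := (List.lookup face pvEdgeCycles).getD []
  let r := PySem.Int.mod times 4
  if r = 0 then state
  else
    let orig := state.toList
    String.ofList ((List.range 4).foldl (fun res g =>
      let src := (3 * PySem.Int.mod (Int.ofNat g - r) 4).toNat
      (List.range 3).foldl (fun res i =>
        res.set (cycle.getD (3 * g + i) 0) (orig.getD (cycle.getD (src + i) 0) ' ')) res)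
      state.toList)

-- ===== PRECONDITION & SPEC =====
-- Pre_ excludes exactly the inputs where A raises: a face not in EDGE_CYCLES (KeyError), or a
-- state too short for the face's facelet indices when at least one round runs (IndexError).
def Pre_cycle_edges (state : String) (face : String) (times : Int) : Prop :=
  (face = "U" ∨ face = "D" ∨ face = "L" ∨ face = "R" ∨ face = "F" ∨ face = "B") ∧
  (PySem.Int.mod times 4 = 0 ∨
    (if face = "U" then 48 else if face = "R" then 52 else
     if face = "F" then 45 else if face = "B" then 43 else 54) ≤ state.toList.length)
instance (state : String) (face : String) (times : Int) : Decidable (Pre_cycle_edges state face times) := by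
  unfold Pre_cycle_edges; infer_instance

def pvWitness_cycle_edges : String × String × Int :=
  ("WWWWWWWWWGGGGGGGGGRRRRRRRRRBBBBBBBBBOOOOOOOOOYYYYYYYYY", "U", 1)

def Spec_cycle_edges (state : String) (face : String) (times : Int) (out : String) : Prop := out = cycle_edges_alt state face times
instance (state : String) (face : String) (times : Int) (out : String) : Decidable (Spec_cycle_edges state face times out) := by unfold Spec_cycle_edges; infer_instance

-- ===== CLAIM (what is proved, stated in full; the proofs are below) =====
def Claim_equal_cycle_edges : Prop := ∀ (state : String) (face : String) (times : Int), Dom_cycle_edges state face times → Pre_cycle_edges state face times → Spec_cycle_edges state face times (cycle_edges state face times)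

-- ===== LEMMAS AND PROOFS =====

-- `pvRemap f l` is l re-indexed through f: position j holds l[f j]
def pvRemap (f : Nat → Nat) (l : List Char) : List Char :=
  (List.range l.length).map fun j => l[f j]?.getD ' '

theorem pvRemap_id (l : List Char) : pvRemap id l = l := by
  apply List.ext_getElem (by simp [pvRemap])
  intro j h1 h2
  simp [pvRemap, List.getElem?_eq_getElem h2]

theorem pvRemap_getD (f : Nat → Nat) (l : List Char) (c L : Nat) (hL : L ≤ l.length)
    (h : c < L) : (pvRemap f l)[c]?.getD ' ' = l[f c]?.getD ' ' := by
  simp [pvRemap, Nat.lt_of_lt_of_le h hL]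

theorem pvRemap_set (f : Nat → Nat) (l : List Char) (d s : Nat) :
    (pvRemap f l).set d (l[s]?.getD ' ') = pvRemap (fun j => if d = j then s else f j) l := by
  apply List.ext_getElem (by simp [pvRemap])
  intro j h1 h2
  rw [List.getElem_set]
  simp only [pvRemap, List.length_map, List.length_range] at h2
  simp only [pvRemap, List.getElem_map, List.getElem_range]
  split <;> simp_all

theorem pvRemap_congr (f g : Nat → Nat) (l : List Char) (h : ∀ j, f j = g j) :
    pvRemap f l = pvRemap g l := by
  simp only [pvRemap]; congr 1; funext j; rw [h]

-- one quarter-turn round on face U is the net re-indexing below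
theorem pvStepA_U (f : Nat → Nat) (l : List Char) (hlen : 48 ≤ l.length) :
    pvStepA [45, 46, 47, 9, 10, 11, 18, 19, 20, 36, 37, 38] (pvRemap f l) =
      pvRemap (fun j => if 45 = j then f 36 else if 46 = j then f 37 else if 47 = j then f 38 else if 9 = j then f 45 else if 10 = j then f 46 else if 11 = j then f 47 else if 18 = j then f 9 else if 19 = j then f 10 else if 20 = j then f 11 else if 36 = j then f 18 else if 37 = j then f 19 else if 38 = j then f 20 else f j) l := by
  have R3 : List.range 3 = [0, 1, 2] := rfl
  simp [pvStepA, R3, pvRemap_getD _ _ _ _ hlen, pvRemap_set]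
  refine pvRemap_congr _ _ _ ?_
  intro j
  by_cases hj : j < 54
  · interval_cases j <;> rfl
  · have hF : ∀ c : Nat, c < 54 → ((c = j) = False) := fun c hc => eq_false (by omega)
    simp [hF]

-- one quarter-turn round on face D is the net re-indexing below
theorem pvStepA_D (f : Nat → Nat) (l : List Char) (hlen : 54 ≤ l.length) :
    pvStepA [24, 25, 26, 15, 16, 17, 51, 52, 53, 42, 43, 44] (pvRemap f l) =
      pvRemap (fun j => if 24 = j then f 42 else if 25 = j then f 43 else if 26 = j then f 44 else if 15 = j then f 24 else if 16 = j then f 25 else if 17 = j then f 26 else if 51 = j then f 15 else if 52 = j then f 16 else if 53 = j then f 17 else if 42 = j then f 51 else if 43 = j then f 52 else if 44 = j then f 53 else f j) l := by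
  have R3 : List.range 3 = [0, 1, 2] := rfl
  simp [pvStepA, R3, pvRemap_getD _ _ _ _ hlen, pvRemap_set]
  refine pvRemap_congr _ _ _ ?_
  intro j
  by_cases hj : j < 54
  · interval_cases j <;> rfl
  · have hF : ∀ c : Nat, c < 54 → ((c = j) = False) := fun c hc => eq_false (by omega)
    simp [hF]

-- one quarter-turn round on face L is the net re-indexing below
theorem pvStepA_L (f : Nat → Nat) (l : List Char) (hlen : 54 ≤ l.length) :
    pvStepA [0, 3, 6, 18, 21, 24, 27, 30, 33, 53, 50, 47] (pvRemap f l) =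
      pvRemap (fun j => if 0 = j then f 53 else if 3 = j then f 50 else if 6 = j then f 47 else if 18 = j then f 0 else if 21 = j then f 3 else if 24 = j then f 6 else if 27 = j then f 18 else if 30 = j then f 21 else if 33 = j then f 24 else if 53 = j then f 27 else if 50 = j then f 30 else if 47 = j then f 33 else f j) l := by
  have R3 : List.range 3 = [0, 1, 2] := rfl
  simp [pvStepA, R3, pvRemap_getD _ _ _ _ hlen, pvRemap_set]
  refine pvRemap_congr _ _ _ ?_
  intro j
  by_cases hj : j < 54
  · interval_cases j <;> rfl
  · have hF : ∀ c : Nat, c < 54 → ((c = j) = False) := fun c hc => eq_false (by omega)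
    simp [hF]

-- one quarter-turn round on face R is the net re-indexing below
theorem pvStepA_R (f : Nat → Nat) (l : List Char) (hlen : 52 ≤ l.length) :
    pvStepA [8, 5, 2, 45, 48, 51, 35, 32, 29, 26, 23, 20] (pvRemap f l) =
      pvRemap (fun j => if 8 = j then f 26 else if 5 = j then f 23 else if 2 = j then f 20 else if 45 = j then f 8 else if 48 = j then f 5 else if 51 = j then f 2 else if 35 = j then f 45 else if 32 = j then f 48 else if 29 = j then f 51 else if 26 = j then f 35 else if 23 = j then f 32 else if 20 = j then f 29 else f j) l := by
  have R3 : List.range 3 = [0, 1, 2] := rfl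
  simp [pvStepA, R3, pvRemap_getD _ _ _ _ hlen, pvRemap_set]
  refine pvRemap_congr _ _ _ ?_
  intro j
  by_cases hj : j < 54
  · interval_cases j <;> rfl
  · have hF : ∀ c : Nat, c < 54 → ((c = j) = False) := fun c hc => eq_false (by omega)
    simp [hF]

-- one quarter-turn round on face F is the net re-indexing below
theorem pvStepA_F (f : Nat → Nat) (l : List Char) (hlen : 45 ≤ l.length) :
    pvStepA [6, 7, 8, 9, 12, 15, 29, 28, 27, 44, 41, 38] (pvRemap f l) =
      pvRemap (fun j => if 6 = j then f 44 else if 7 = j then f 41 else if 8 = j then f 38 else if 9 = j then f 6 else if 12 = j then f 7 else if 15 = j then f 8 else if 29 = j then f 9 else if 28 = j then f 12 else if 27 = j then f 15 else if 44 = j then f 29 else if 41 = j then f 28 else if 38 = j then f 27 else f j) l := by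
  have R3 : List.range 3 = [0, 1, 2] := rfl
  simp [pvStepA, R3, pvRemap_getD _ _ _ _ hlen, pvRemap_set]
  refine pvRemap_congr _ _ _ ?_
  intro j
  by_cases hj : j < 54
  · interval_cases j <;> rfl
  · have hF : ∀ c : Nat, c < 54 → ((c = j) = False) := fun c hc => eq_false (by omega)
    simp [hF]

-- one quarter-turn round on face B is the net re-indexing below
theorem pvStepA_B (f : Nat → Nat) (l : List Char) (hlen : 43 ≤ l.length) :
    pvStepA [2, 1, 0, 36, 39, 42, 33, 34, 35, 17, 14, 11] (pvRemap f l) =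
      pvRemap (fun j => if 2 = j then f 17 else if 1 = j then f 14 else if 0 = j then f 11 else if 36 = j then f 2 else if 39 = j then f 1 else if 42 = j then f 0 else if 33 = j then f 36 else if 34 = j then f 39 else if 35 = j then f 42 else if 17 = j then f 33 else if 14 = j then f 34 else if 11 = j then f 35 else f j) l := by
  have R3 : List.range 3 = [0, 1, 2] := rfl
  simp [pvStepA, R3, pvRemap_getD _ _ _ _ hlen, pvRemap_set]
  refine pvRemap_congr _ _ _ ?_
  intro j
  by_cases hj : j < 54
  · interval_cases j <;> rfl
  · have hF : ∀ c : Nat, c < 54 → ((c = j) = False) := fun c hc => eq_false (by omega)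
    simp [hF]

-- ===== VERDICT (by name: the statement is the Claim_ definition above) =====
theorem cycle_edges_spec : Claim_equal_cycle_edges := by
  intro state face times _ hpre
  obtain ⟨hface, hlen⟩ := hpre
  unfold Spec_cycle_edges cycle_edges cycle_edges_alt
  have hm0 : 0 ≤ PySem.Int.mod times 4 := PySem.Int.mod_nonneg (a := times) (by norm_num)
  have hm4 : PySem.Int.mod times 4 < 4 := PySem.Int.mod_lt (a := times) (by norm_num)
  have R3 : List.range 3 = [0, 1, 2] := rfl
  have R4 : List.range 4 = [0, 1, 2, 3] := rfl
  rcases (by omega : PySem.Int.mod times 4 = 0 ∨ PySem.Int.mod times 4 = 1 ∨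
      PySem.Int.mod times 4 = 2 ∨ PySem.Int.mod times 4 = 3) with hr | hr | hr | hr
  · simp only [hr]; simp
  · rcases hlen with h0 | hlen
    · omega
    rcases hface with rfl | rfl | rfl | rfl | rfl | rfl
    · norm_num at hlen
      simp only [hr]
      rw [show state.toList = pvRemap id state.toList from (pvRemap_id _).symm]
      rw [show (List.lookup "U" pvEdgeCycles).getD [] = [45, 46, 47, 9, 10, 11, 18, 19, 20, 36, 37, 38] from rfl]
      rw [show List.range (Int.toNat (1 : Int)) = [0] from rfl]
      simp only [R3, R4, List.foldl_cons, List.foldl_nil]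
      rw [pvStepA_U _ _ hlen]
      simp [PySem.Int.mod, pvRemap_getD _ _ _ _ hlen, pvRemap_set]
      refine congrArg String.ofList ?_
      refine pvRemap_congr _ _ _ ?_
      intro j
      by_cases hj : j < 54
      · interval_cases j <;> rfl
      · have hF : ∀ c : Nat, c < 54 → ((c = j) = False) := fun c hc => eq_false (by omega)
        simp [hF]
    · norm_num at hlen
      simp only [hr]
      rw [show state.toList = pvRemap id state.toList from (pvRemap_id _).symm]
      rw [show (List.lookup "D" pvEdgeCycles).getD [] = [24, 25, 26, 15, 16, 17, 51, 52, 53, 42, 43, 44] from rfl]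
      rw [show List.range (Int.toNat (1 : Int)) = [0] from rfl]
      simp only [R3, R4, List.foldl_cons, List.foldl_nil]
      rw [pvStepA_D _ _ hlen]
      simp [PySem.Int.mod, pvRemap_getD _ _ _ _ hlen, pvRemap_set]
      refine congrArg String.ofList ?_
      refine pvRemap_congr _ _ _ ?_
      intro j
      by_cases hj : j < 54
      · interval_cases j <;> rfl
      · have hF : ∀ c : Nat, c < 54 → ((c = j) = False) := fun c hc => eq_false (by omega)
        simp [hF]
    · norm_num at hlen
      simp only [hr]
      rw [show state.toList = pvRemap id state.toList from (pvRemap_id _).symm]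
      rw [show (List.lookup "L" pvEdgeCycles).getD [] = [0, 3, 6, 18, 21, 24, 27, 30, 33, 53, 50, 47] from rfl]
      rw [show List.range (Int.toNat (1 : Int)) = [0] from rfl]
      simp only [R3, R4, List.foldl_cons, List.foldl_nil]
      rw [pvStepA_L _ _ hlen]
      simp [PySem.Int.mod, pvRemap_getD _ _ _ _ hlen, pvRemap_set]
      refine congrArg String.ofList ?_
      refine pvRemap_congr _ _ _ ?_
      intro j
      by_cases hj : j < 54
      · interval_cases j <;> rfl
      · have hF : ∀ c : Nat, c < 54 → ((c = j) = False) := fun c hc => eq_false (by omega)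
        simp [hF]
    · norm_num at hlen
      simp only [hr]
      rw [show state.toList = pvRemap id state.toList from (pvRemap_id _).symm]
      rw [show (List.lookup "R" pvEdgeCycles).getD [] = [8, 5, 2, 45, 48, 51, 35, 32, 29, 26, 23, 20] from rfl]
      rw [show List.range (Int.toNat (1 : Int)) = [0] from rfl]
      simp only [R3, R4, List.foldl_cons, List.foldl_nil]
      rw [pvStepA_R _ _ hlen]
      simp [PySem.Int.mod, pvRemap_getD _ _ _ _ hlen, pvRemap_set]
      refine congrArg String.ofList ?_
      refine pvRemap_congr _ _ _ ?_
      intro j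
      by_cases hj : j < 54
      · interval_cases j <;> rfl
      · have hF : ∀ c : Nat, c < 54 → ((c = j) = False) := fun c hc => eq_false (by omega)
        simp [hF]
    · norm_num at hlen
      simp only [hr]
      rw [show state.toList = pvRemap id state.toList from (pvRemap_id _).symm]
      rw [show (List.lookup "F" pvEdgeCycles).getD [] = [6, 7, 8, 9, 12, 15, 29, 28, 27, 44, 41, 38] from rfl]
      rw [show List.range (Int.toNat (1 : Int)) = [0] from rfl]
      simp only [R3, R4, List.foldl_cons, List.foldl_nil]
      rw [pvStepA_F _ _ hlen]
      simp [PySem.Int.mod, pvRemap_getD _ _ _ _ hlen, pvRemap_set]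
      refine congrArg String.ofList ?_
      refine pvRemap_congr _ _ _ ?_
      intro j
      by_cases hj : j < 54
      · interval_cases j <;> rfl
      · have hF : ∀ c : Nat, c < 54 → ((c = j) = False) := fun c hc => eq_false (by omega)
        simp [hF]
    · norm_num at hlen
      simp only [hr]
      rw [show state.toList = pvRemap id state.toList from (pvRemap_id _).symm]
      rw [show (List.lookup "B" pvEdgeCycles).getD [] = [2, 1, 0, 36, 39, 42, 33, 34, 35, 17, 14, 11] from rfl]
      rw [show List.range (Int.toNat (1 : Int)) = [0] from rfl]
      simp only [R3, R4, List.foldl_cons, List.foldl_nil]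
      rw [pvStepA_B _ _ hlen]
      simp [PySem.Int.mod, pvRemap_getD _ _ _ _ hlen, pvRemap_set]
      refine congrArg String.ofList ?_
      refine pvRemap_congr _ _ _ ?_
      intro j
      by_cases hj : j < 54
      · interval_cases j <;> rfl
      · have hF : ∀ c : Nat, c < 54 → ((c = j) = False) := fun c hc => eq_false (by omega)
        simp [hF]
  · rcases hlen with h0 | hlen
    · omega
    rcases hface with rfl | rfl | rfl | rfl | rfl | rfl
    · norm_num at hlen
      simp only [hr]
      rw [show state.toList = pvRemap id state.toList from (pvRemap_id _).symm]
      rw [show (List.lookup "U" pvEdgeCycles).getD [] = [45, 46, 47, 9, 10, 11, 18, 19, 20, 36, 37, 38] from rfl]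
      rw [show List.range (Int.toNat (2 : Int)) = [0, 1] from rfl]
      simp only [R3, R4, List.foldl_cons, List.foldl_nil]
      rw [pvStepA_U _ _ hlen]
      rw [pvStepA_U _ _ hlen]
      simp [PySem.Int.mod, pvRemap_getD _ _ _ _ hlen, pvRemap_set]
      refine congrArg String.ofList ?_
      refine pvRemap_congr _ _ _ ?_
      intro j
      by_cases hj : j < 54
      · interval_cases j <;> rfl
      · have hF : ∀ c : Nat, c < 54 → ((c = j) = False) := fun c hc => eq_false (by omega)
        simp [hF]
    · norm_num at hlen
      simp only [hr]
      rw [show state.toList = pvRemap id state.toList from (pvRemap_id _).symm]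
      rw [show (List.lookup "D" pvEdgeCycles).getD [] = [24, 25, 26, 15, 16, 17, 51, 52, 53, 42, 43, 44] from rfl]
      rw [show List.range (Int.toNat (2 : Int)) = [0, 1] from rfl]
      simp only [R3, R4, List.foldl_cons, List.foldl_nil]
      rw [pvStepA_D _ _ hlen]
      rw [pvStepA_D _ _ hlen]
      simp [PySem.Int.mod, pvRemap_getD _ _ _ _ hlen, pvRemap_set]
      refine congrArg String.ofList ?_
      refine pvRemap_congr _ _ _ ?_
      intro j
      by_cases hj : j < 54
      · interval_cases j <;> rfl
      · have hF : ∀ c : Nat, c < 54 → ((c = j) = False) := fun c hc => eq_false (by omega)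
        simp [hF]
    · norm_num at hlen
      simp only [hr]
      rw [show state.toList = pvRemap id state.toList from (pvRemap_id _).symm]
      rw [show (List.lookup "L" pvEdgeCycles).getD [] = [0, 3, 6, 18, 21, 24, 27, 30, 33, 53, 50, 47] from rfl]
      rw [show List.range (Int.toNat (2 : Int)) = [0, 1] from rfl]
      simp only [R3, R4, List.foldl_cons, List.foldl_nil]
      rw [pvStepA_L _ _ hlen]
      rw [pvStepA_L _ _ hlen]
      simp [PySem.Int.mod, pvRemap_getD _ _ _ _ hlen, pvRemap_set]
      refine congrArg String.ofList ?_
      refine pvRemap_congr _ _ _ ?_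
      intro j
      by_cases hj : j < 54
      · interval_cases j <;> rfl
      · have hF : ∀ c : Nat, c < 54 → ((c = j) = False) := fun c hc => eq_false (by omega)
        simp [hF]
    · norm_num at hlen
      simp only [hr]
      rw [show state.toList = pvRemap id state.toList from (pvRemap_id _).symm]
      rw [show (List.lookup "R" pvEdgeCycles).getD [] = [8, 5, 2, 45, 48, 51, 35, 32, 29, 26, 23, 20] from rfl]
      rw [show List.range (Int.toNat (2 : Int)) = [0, 1] from rfl]
      simp only [R3, R4, List.foldl_cons, List.foldl_nil]
      rw [pvStepA_R _ _ hlen]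
      rw [pvStepA_R _ _ hlen]
      simp [PySem.Int.mod, pvRemap_getD _ _ _ _ hlen, pvRemap_set]
      refine congrArg String.ofList ?_
      refine pvRemap_congr _ _ _ ?_
      intro j
      by_cases hj : j < 54
      · interval_cases j <;> rfl
      · have hF : ∀ c : Nat, c < 54 → ((c = j) = False) := fun c hc => eq_false (by omega)
        simp [hF]
    · norm_num at hlen
      simp only [hr]
      rw [show state.toList = pvRemap id state.toList from (pvRemap_id _).symm]
      rw [show (List.lookup "F" pvEdgeCycles).getD [] = [6, 7, 8, 9, 12, 15, 29, 28, 27, 44, 41, 38] from rfl]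
      rw [show List.range (Int.toNat (2 : Int)) = [0, 1] from rfl]
      simp only [R3, R4, List.foldl_cons, List.foldl_nil]
      rw [pvStepA_F _ _ hlen]
      rw [pvStepA_F _ _ hlen]
      simp [PySem.Int.mod, pvRemap_getD _ _ _ _ hlen, pvRemap_set]
      refine congrArg String.ofList ?_
      refine pvRemap_congr _ _ _ ?_
      intro j
      by_cases hj : j < 54
      · interval_cases j <;> rfl
      · have hF : ∀ c : Nat, c < 54 → ((c = j) = False) := fun c hc => eq_false (by omega)
        simp [hF]
    · norm_num at hlen
      simp only [hr]
      rw [show state.toList = pvRemap id state.toList from (pvRemap_id _).symm]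
      rw [show (List.lookup "B" pvEdgeCycles).getD [] = [2, 1, 0, 36, 39, 42, 33, 34, 35, 17, 14, 11] from rfl]
      rw [show List.range (Int.toNat (2 : Int)) = [0, 1] from rfl]
      simp only [R3, R4, List.foldl_cons, List.foldl_nil]
      rw [pvStepA_B _ _ hlen]
      rw [pvStepA_B _ _ hlen]
      simp [PySem.Int.mod, pvRemap_getD _ _ _ _ hlen, pvRemap_set]
      refine congrArg String.ofList ?_
      refine pvRemap_congr _ _ _ ?_
      intro j
      by_cases hj : j < 54
      · interval_cases j <;> rfl
      · have hF : ∀ c : Nat, c < 54 → ((c = j) = False) := fun c hc => eq_false (by omega)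
        simp [hF]
  · rcases hlen with h0 | hlen
    · omega
    rcases hface with rfl | rfl | rfl | rfl | rfl | rfl
    · norm_num at hlen
      simp only [hr]
      rw [show state.toList = pvRemap id state.toList from (pvRemap_id _).symm]
      rw [show (List.lookup "U" pvEdgeCycles).getD [] = [45, 46, 47, 9, 10, 11, 18, 19, 20, 36, 37, 38] from rfl]
      rw [show List.range (Int.toNat (3 : Int)) = [0, 1, 2] from rfl]
      simp only [R3, R4, List.foldl_cons, List.foldl_nil]
      rw [pvStepA_U _ _ hlen]
      rw [pvStepA_U _ _ hlen]
      rw [pvStepA_U _ _ hlen]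
      simp [PySem.Int.mod, pvRemap_getD _ _ _ _ hlen, pvRemap_set]
      refine congrArg String.ofList ?_
      refine pvRemap_congr _ _ _ ?_
      intro j
      by_cases hj : j < 54
      · interval_cases j <;> rfl
      · have hF : ∀ c : Nat, c < 54 → ((c = j) = False) := fun c hc => eq_false (by omega)
        simp [hF]
    · norm_num at hlen
      simp only [hr]
      rw [show state.toList = pvRemap id state.toList from (pvRemap_id _).symm]
      rw [show (List.lookup "D" pvEdgeCycles).getD [] = [24, 25, 26, 15, 16, 17, 51, 52, 53, 42, 43, 44] from rfl]
      rw [show List.range (Int.toNat (3 : Int)) = [0, 1, 2] from rfl]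
      simp only [R3, R4, List.foldl_cons, List.foldl_nil]
      rw [pvStepA_D _ _ hlen]
      rw [pvStepA_D _ _ hlen]
      rw [pvStepA_D _ _ hlen]
      simp [PySem.Int.mod, pvRemap_getD _ _ _ _ hlen, pvRemap_set]
      refine congrArg String.ofList ?_
      refine pvRemap_congr _ _ _ ?_
      intro j
      by_cases hj : j < 54
      · interval_cases j <;> rfl
      · have hF : ∀ c : Nat, c < 54 → ((c = j) = False) := fun c hc => eq_false (by omega)
        simp [hF]
    · norm_num at hlen
      simp only [hr]
      rw [show state.toList = pvRemap id state.toList from (pvRemap_id _).symm]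
      rw [show (List.lookup "L" pvEdgeCycles).getD [] = [0, 3, 6, 18, 21, 24, 27, 30, 33, 53, 50, 47] from rfl]
      rw [show List.range (Int.toNat (3 : Int)) = [0, 1, 2] from rfl]
      simp only [R3, R4, List.foldl_cons, List.foldl_nil]
      rw [pvStepA_L _ _ hlen]
      rw [pvStepA_L _ _ hlen]
      rw [pvStepA_L _ _ hlen]
      simp [PySem.Int.mod, pvRemap_getD _ _ _ _ hlen, pvRemap_set]
      refine congrArg String.ofList ?_
      refine pvRemap_congr _ _ _ ?_
      intro j
      by_cases hj : j < 54
      · interval_cases j <;> rfl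
      · have hF : ∀ c : Nat, c < 54 → ((c = j) = False) := fun c hc => eq_false (by omega)
        simp [hF]
    · norm_num at hlen
      simp only [hr]
      rw [show state.toList = pvRemap id state.toList from (pvRemap_id _).symm]
      rw [show (List.lookup "R" pvEdgeCycles).getD [] = [8, 5, 2, 45, 48, 51, 35, 32, 29, 26, 23, 20] from rfl]
      rw [show List.range (Int.toNat (3 : Int)) = [0, 1, 2] from rfl]
      simp only [R3, R4, List.foldl_cons, List.foldl_nil]
      rw [pvStepA_R _ _ hlen]
      rw [pvStepA_R _ _ hlen]
      rw [pvStepA_R _ _ hlen]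
      simp [PySem.Int.mod, pvRemap_getD _ _ _ _ hlen, pvRemap_set]
      refine congrArg String.ofList ?_
      refine pvRemap_congr _ _ _ ?_
      intro j
      by_cases hj : j < 54
      · interval_cases j <;> rfl
      · have hF : ∀ c : Nat, c < 54 → ((c = j) = False) := fun c hc => eq_false (by omega)
        simp [hF]
    · norm_num at hlen
      simp only [hr]
      rw [show state.toList = pvRemap id state.toList from (pvRemap_id _).symm]
      rw [show (List.lookup "F" pvEdgeCycles).getD [] = [6, 7, 8, 9, 12, 15, 29, 28, 27, 44, 41, 38] from rfl]
      rw [show List.range (Int.toNat (3 : Int)) = [0, 1, 2] from rfl]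
      simp only [R3, R4, List.foldl_cons, List.foldl_nil]
      rw [pvStepA_F _ _ hlen]
      rw [pvStepA_F _ _ hlen]
      rw [pvStepA_F _ _ hlen]
      simp [PySem.Int.mod, pvRemap_getD _ _ _ _ hlen, pvRemap_set]
      refine congrArg String.ofList ?_
      refine pvRemap_congr _ _ _ ?_
      intro j
      by_cases hj : j < 54
      · interval_cases j <;> rfl
      · have hF : ∀ c : Nat, c < 54 → ((c = j) = False) := fun c hc => eq_false (by omega)
        simp [hF]
    · norm_num at hlen
      simp only [hr]
      rw [show state.toList = pvRemap id state.toList from (pvRemap_id _).symm]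
      rw [show (List.lookup "B" pvEdgeCycles).getD [] = [2, 1, 0, 36, 39, 42, 33, 34, 35, 17, 14, 11] from rfl]
      rw [show List.range (Int.toNat (3 : Int)) = [0, 1, 2] from rfl]
      simp only [R3, R4, List.foldl_cons, List.foldl_nil]
      rw [pvStepA_B _ _ hlen]
      rw [pvStepA_B _ _ hlen]
      rw [pvStepA_B _ _ hlen]
      simp [PySem.Int.mod, pvRemap_getD _ _ _ _ hlen, pvRemap_set]
      refine congrArg String.ofList ?_
      refine pvRemap_congr _ _ _ ?_
      intro j
      by_cases hj : j < 54
      · interval_cases j <;> rfl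
      · have hF : ∀ c : Nat, c < 54 → ((c = j) = False) := fun c hc => eq_false (by omega)
        simp [hF]
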